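-- pv_equiv track=rewrite | github.com/LYXFOREVER/my_android_world | android_world/env/adb_utils.py | _split_words_and_newlines
-- ===== SOURCE A (Python) =====
-- from typing import Any, Callable, Collection, Iterable, Literal, Optional, TypeVar
--
-- def _split_words_and_newlines(text: str) -> Iterable[str]:
--   """Split lines of text into individual words and newline chars."""
--   lines = text.split('\n')
--   for i, line in enumerate(lines):
--     words = line.split(' ')
--     for j, word in enumerate(words):
--       yield word
--       if j < len(words) - 1:
--         yield '%s'
--     if i < len(lines) - 1:
--       yield '\n'
-- ===== SOURCE B (Python) =====
-- def _split_words_and_newlines(text: str):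
--   """Split lines of text into individual words and newline chars.
--
--   Single pass over the characters with a word buffer, instead of
--   nested split('\n')/split(' ') loops; same tokens, still a generator.
--   """
--   buf = ''
--   for ch in text:
--     if ch == ' ':
--       yield buf
--       buf = ''
--       yield '%s'
--     elif ch == '\n':
--       yield buf
--       buf = ''
--       yield '\n'
--     else:
--       buf += ch
--   yield buf
-- ===== Notes on version B (the rewrite author's own statement) =====
-- stated objective: alternative
-- what changed: Replaces the nested split('\n')/split(' ') loops (which materialize line and word lists) with a single character-level pass maintaining a current-word buffer and emitting separator tokens as it goes.
import Mathlib
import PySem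

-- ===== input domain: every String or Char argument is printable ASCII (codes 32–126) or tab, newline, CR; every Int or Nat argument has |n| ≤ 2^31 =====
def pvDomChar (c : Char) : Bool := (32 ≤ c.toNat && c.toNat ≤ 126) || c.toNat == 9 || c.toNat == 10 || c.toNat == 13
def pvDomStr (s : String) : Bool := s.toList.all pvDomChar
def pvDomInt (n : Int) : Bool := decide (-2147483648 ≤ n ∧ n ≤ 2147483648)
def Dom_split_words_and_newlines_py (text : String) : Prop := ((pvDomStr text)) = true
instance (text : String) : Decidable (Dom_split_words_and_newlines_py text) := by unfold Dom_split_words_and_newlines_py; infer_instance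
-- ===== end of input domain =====

-- B replaces the nested split('\n')/split(' ') loops with one character pass keeping a word buffer; same tokens (alternative decomposition, not claimed faster).

-- ===== PORT A =====
-- Python A: lines = text.split('\n'); for i, line in enumerate(lines): words = line.split(' ');
--   for j, word in enumerate(words): yield word; if j < len(words)-1: yield '%s';  if i < len(lines)-1: yield '\n'
-- (A is a generator; its yielded sequence is collected as a List String.)
def split_words_and_newlines_py (text : String) : List String :=
  let lines := PySem.Chars.splitOn text.toList ['\n']
  (PySem.List.enumerate lines).foldl (fun out p =>
    let words := PySem.Chars.splitOn p.2 [' ']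
    let out := (PySem.List.enumerate words).foldl (fun out q =>
      let out := out ++ [String.ofList q.2]
      if q.1 < (words.length : Int) - 1 then out ++ ["%s"] else out) out
    if p.1 < (lines.length : Int) - 1 then out ++ ["\n"] else out) []

-- ===== PORT B =====
-- B: single pass over the characters with a current-word buffer; on ' ' emit buffer then '%s',
-- on '\n' emit buffer then '\n', else grow the buffer; finally emit the buffer.
def split_words_and_newlines_py_alt (text : String) : List String :=
  let st := text.toList.foldl (fun (p : List String × List Char) c =>
    if c = ' ' then (p.1 ++ [String.ofList p.2, "%s"], [])
    else if c = '\n' then (p.1 ++ [String.ofList p.2, "\n"], [])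
    else (p.1, p.2 ++ [c])) ([], [])
  st.1 ++ [String.ofList st.2]

-- ===== PRECONDITION & SPEC =====
def Spec_split_words_and_newlines_py (text : String) (out : List String) : Prop := out = split_words_and_newlines_py_alt text
instance (text : String) (out : List String) : Decidable (Spec_split_words_and_newlines_py text out) := by unfold Spec_split_words_and_newlines_py; infer_instance

-- ===== CLAIM (what is proved, stated in full; the proofs are below) =====
def Claim_equal_split_words_and_newlines_py : Prop := ∀ (text : String), Dom_split_words_and_newlines_py text → Spec_split_words_and_newlines_py text (split_words_and_newlines_py text)

-- ===== LEMMAS AND PROOFS =====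

-- reference single-char splitter: Python split on a one-char separator
def chSplit (d : Char) : List Char → List (List Char)
  | [] => [[]]
  | c :: cs => if c = d then [] :: chSplit d cs else (chSplit d cs).modifyHead (c :: ·)

-- token list of one line: words separated by '%s'
def lineTok (l : List Char) : List (List Char) :=
  List.intersperse ['%', 's'] (chSplit ' ' l)

-- token list of the whole text, built the way B builds it (buffer handled by modifyHead)
def tok : List Char → List (List Char)
  | [] => [[]]
  | c :: cs =>
    if c = ' ' then [] :: ['%', 's'] :: tok cs
    else if c = '\n' then [] :: ['\n'] :: tok cs
    else (tok cs).modifyHead (c :: ·)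

theorem modifyHead_fun_id {α : Type} (l : List α) : List.modifyHead (fun x => x) l = l := by
  cases l <;> simp

theorem chSplit_ne_nil (d : Char) (l : List Char) : chSplit d l ≠ [] := by
  cases l with
  | nil => simp [chSplit]
  | cons c cs =>
    simp only [chSplit]
    split
    · simp
    · cases h : chSplit d cs with
      | nil => exact absurd h (chSplit_ne_nil d cs)
      | cons a as => simp

theorem tok_ne_nil (cs : List Char) : tok cs ≠ [] := by
  cases cs with
  | nil => simp [tok]
  | cons c cs =>
    simp only [tok]
    split
    · simp
    · split
      · simp
      · cases h : tok cs with
        | nil => exact absurd h (tok_ne_nil cs)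
        | cons a as => simp

theorem lineTok_ne_nil (l : List Char) : lineTok l ≠ [] := by
  unfold lineTok
  cases h : chSplit ' ' l with
  | nil => exact absurd h (chSplit_ne_nil ' ' l)
  | cons a as => cases as <;> simp [List.intersperse]

theorem splitOn_go_eq (d : Char) (l : List Char) : ∀ (fuel : Nat) (cur : List Char)
    (acc : List (List Char)), l.length ≤ fuel →
    PySem.Chars.splitOn.go [d] fuel l cur acc
      = acc.reverse ++ (chSplit d l).modifyHead (cur.reverse ++ ·) := by
  induction l with
  | nil =>
    intro fuel cur acc _
    cases fuel <;> simp [PySem.Chars.splitOn.go, chSplit]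
  | cons c cs ih =>
    intro fuel cur acc hf
    cases fuel with
    | zero => simp at hf
    | succ f =>
      have hf' : cs.length ≤ f := by simpa using hf
      by_cases hc : c = d
      · have hpre : List.isPrefixOf [d] (c :: cs) = true := by simp [List.isPrefixOf, hc]
        rw [show PySem.Chars.splitOn.go [d] (f+1) (c :: cs) cur acc
              = PySem.Chars.splitOn.go [d] f (List.drop 1 (c :: cs)) [] (cur.reverse :: acc) by
            simp [PySem.Chars.splitOn.go, hpre]]
        simp only [List.drop_succ_cons, List.drop_zero]
        rw [ih f [] (cur.reverse :: acc) hf']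
        cases h : chSplit d cs with
        | nil => exact absurd h (chSplit_ne_nil d cs)
        | cons a as => simp [chSplit, hc, h]
      · have hpre : List.isPrefixOf [d] (c :: cs) = false := by
          simp [List.isPrefixOf]; exact fun h => absurd h.symm hc
        rw [show PySem.Chars.splitOn.go [d] (f+1) (c :: cs) cur acc
              = PySem.Chars.splitOn.go [d] f cs (c :: cur) acc by
            simp [PySem.Chars.splitOn.go, hpre]]
        rw [ih f (c :: cur) acc hf']
        cases h : chSplit d cs with
        | nil => exact absurd h (chSplit_ne_nil d cs)
        | cons a as => simp [chSplit, hc, h]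

theorem splitOn_single (d : Char) (l : List Char) :
    PySem.Chars.splitOn l [d] = chSplit d l := by
  have := splitOn_go_eq d l (l.length + 1) [] [] (by omega)
  simpa [PySem.Chars.splitOn, modifyHead_fun_id] using this

-- inner loop of A: words interspersed with '%s'
theorem innerFold (ws : List (List Char)) (n : Int) : ∀ (k : Int), k + ws.length = n →
    ∀ (out : List String),
    (PySem.List.enumerate ws k).foldl (fun out q =>
        let out := out ++ [String.ofList q.2]
        if q.1 < n - 1 then out ++ ["%s"] else out) out
      = out ++ (List.intersperse ['%', 's'] ws).map String.ofList := by
  induction ws with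
  | nil => intro k hk out; simp [PySem.List.enumerate]
  | cons w ws ih =>
    intro k hk out
    rw [show PySem.List.enumerate (w :: ws) k = (k, w) :: PySem.List.enumerate ws (k + 1) by
      simp [PySem.List.enumerate]]
    cases ws with
    | nil =>
      have hk' : ¬ (k < n - 1) := by simp at hk; omega
      simp [PySem.List.enumerate, hk', List.intersperse]
    | cons v vs =>
      have hlt : k < n - 1 := by simp at hk; omega
      have hk2 : (k + 1) + ((v :: vs).length : Int) = n := by simp at hk ⊢; omega
      simp only [List.foldl_cons, hlt, if_pos]
      rw [ih (k + 1) hk2]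
      simp [List.intersperse]

-- outer loop of A: per-line tokens joined by '\n'
theorem outerFold (ls : List (List Char)) (n : Int) : ∀ (k : Int), k + ls.length = n →
    ∀ (out : List String),
    (PySem.List.enumerate ls k).foldl (fun out p =>
        let words := PySem.Chars.splitOn p.2 [' ']
        let out := (PySem.List.enumerate words).foldl (fun out q =>
          let out := out ++ [String.ofList q.2]
          if q.1 < (words.length : Int) - 1 then out ++ ["%s"] else out) out
        if p.1 < n - 1 then out ++ ["\n"] else out) out
      = out ++ ((List.intersperse [['\n']] (ls.map lineTok)).flatten).map String.ofList := by
  induction ls with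
  | nil => intro k hk out; simp [PySem.List.enumerate]
  | cons l ls ih =>
    intro k hk out
    rw [show PySem.List.enumerate (l :: ls) k = (k, l) :: PySem.List.enumerate ls (k + 1) by
      simp [PySem.List.enumerate]]
    simp only [List.foldl_cons]
    rw [innerFold (PySem.Chars.splitOn l [' ']) ((PySem.Chars.splitOn l [' ']).length : Int) 0
      (by simp) out]
    rw [splitOn_single]
    cases ls with
    | nil =>
      have hk' : ¬ (k < n - 1) := by simp at hk; omega
      simp [PySem.List.enumerate, hk', lineTok]
    | cons m ms =>
      have hlt : k < n - 1 := by simp at hk; omega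
      have hk2 : (k + 1) + ((m :: ms).length : Int) = n := by simp at hk ⊢; omega
      simp only [hlt, if_pos]
      rw [ih (k + 1) hk2]
      simp [lineTok]

-- the joined per-line tokens are exactly tok
theorem flatten_lineTok_eq_tok (cs : List Char) :
    (List.intersperse [['\n']] ((chSplit '\n' cs).map lineTok)).flatten = tok cs := by
  induction cs with
  | nil => simp [chSplit, lineTok, tok]
  | cons c cs ih =>
    by_cases hn : c = '\n'
    · subst hn
      simp only [chSplit, tok, reduceIte, List.map_cons]
      cases h : (chSplit '\n' cs).map lineTok with
      | nil => simp [h] at ih; exact absurd (List.map_eq_nil_iff.mp h) (chSplit_ne_nil '\n' cs)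
      | cons a as =>
        rw [h] at ih
        simpa [List.intersperse, lineTok, chSplit] using ih
    · by_cases hs : c = ' '
      · subst hs
        have hn' : (' ' : Char) ≠ '\n' := by decide
        simp only [chSplit, if_neg hn', tok, reduceIte]
        cases h : chSplit '\n' cs with
        | nil => exact absurd h (chSplit_ne_nil '\n' cs)
        | cons a as =>
          rw [h] at ih
          have hlt : lineTok (' ' :: a) = [] :: ['%','s'] :: lineTok a := by
            unfold lineTok
            have : chSplit ' ' (' ' :: a) = [] :: chSplit ' ' a := by simp [chSplit]
            rw [this]
            cases hca : chSplit ' ' a with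
            | nil => exact absurd hca (chSplit_ne_nil ' ' a)
            | cons b bs => simp [List.intersperse]
          cases as with
          | nil =>
            simp only [List.map_cons, List.map_nil, List.intersperse] at ih ⊢
            simp [hlt, ← ih]
          | cons a2 as2 =>
            simp only [List.map_cons, List.intersperse] at ih ⊢
            simp [hlt, ← ih]
      · have hstep : chSplit '\n' (c :: cs) = (chSplit '\n' cs).modifyHead (c :: ·) := by
          simp [chSplit, hn]
        have htok : tok (c :: cs) = (tok cs).modifyHead (c :: ·) := by
          simp [tok, hs, hn]
        rw [hstep, htok, ← ih]
        cases h : chSplit '\n' cs with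
        | nil => exact absurd h (chSplit_ne_nil '\n' cs)
        | cons a as =>
          simp only [List.modifyHead_cons, List.map_cons]
          have hlt2 : lineTok (c :: a) = (lineTok a).modifyHead (c :: ·) := by
            unfold lineTok
            have : chSplit ' ' (c :: a) = (chSplit ' ' a).modifyHead (c :: ·) := by
              simp [chSplit, hs]
            rw [this]
            cases hca : chSplit ' ' a with
            | nil => exact absurd hca (chSplit_ne_nil ' ' a)
            | cons b bs => cases bs <;> simp [List.intersperse]
          rw [hlt2]
          cases hlta : lineTok a with
          | nil => exact absurd hlta (lineTok_ne_nil a)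
          | cons t ts =>
            cases as <;> simp

-- B's fold computes tok with the buffer threaded through modifyHead
theorem bFold (cs : List Char) : ∀ (out : List String) (buf : List Char),
    (cs.foldl (fun (p : List String × List Char) c =>
        if c = ' ' then (p.1 ++ [String.ofList p.2, "%s"], [])
        else if c = '\n' then (p.1 ++ [String.ofList p.2, "\n"], [])
        else (p.1, p.2 ++ [c])) (out, buf)).1
      ++ [String.ofList (cs.foldl (fun (p : List String × List Char) c =>
        if c = ' ' then (p.1 ++ [String.ofList p.2, "%s"], [])
        else if c = '\n' then (p.1 ++ [String.ofList p.2, "\n"], [])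
        else (p.1, p.2 ++ [c])) (out, buf)).2]
      = out ++ ((tok cs).modifyHead (buf ++ ·)).map String.ofList := by
  induction cs with
  | nil => intro out buf; simp [tok]
  | cons c cs ih =>
    intro out buf
    by_cases hs : c = ' '
    · subst hs
      simp only [List.foldl_cons, reduceIte, tok]
      rw [ih (out ++ [String.ofList buf, "%s"]) []]
      simp [modifyHead_fun_id]
    · by_cases hn : c = '\n'
      · subst hn
        have : (('\n' : Char) = ' ') = False := by simp
        simp only [List.foldl_cons, this, reduceIte, if_false, tok]
        rw [ih (out ++ [String.ofList buf, "\n"]) []]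
        simp [modifyHead_fun_id]
      · simp only [List.foldl_cons, if_neg hs, if_neg hn, tok]
        rw [ih out (buf ++ [c])]
        rw [List.modifyHead_modifyHead]
        have : ((fun x => buf ++ x) ∘ (fun x => c :: x)) = (fun x => (buf ++ [c]) ++ x) := by
          funext x; simp
        rw [this]

-- ===== VERDICT (by name: the statement is the Claim_ definition above) =====
theorem split_words_and_newlines_py_spec : Claim_equal_split_words_and_newlines_py := by
  intro text _
  unfold Spec_split_words_and_newlines_py split_words_and_newlines_py split_words_and_newlines_py_alt
  rw [outerFold (PySem.Chars.splitOn text.toList ['\n'])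
      ((PySem.Chars.splitOn text.toList ['\n']).length : Int) 0 (by simp) []]
  rw [splitOn_single, flatten_lineTok_eq_tok]
  have hb := bFold text.toList [] []
  simp only [List.nil_append] at hb ⊢
  rw [hb]
  rw [modifyHead_fun_id]
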